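-- pv_equiv track=rewrite | github.com/amitcjmu/Stock-Analysis | backend/app/api/v1/endpoints/data_import/field_mapping/validators/field_validators.py | _check_string_format_consistency
-- ===== SOURCE A (Python) =====
-- from typing import Any, List, Dict, Optional
--
-- def _check_string_format_consistency(string_values: List[str]) -> bool:
--     """Check if string values have consistent formatting."""
--     if len(string_values) < 2:
--         return True
--
--     # Check for consistent patterns
--     patterns = {
--         "has_spaces": any(' ' in v for v in string_values),
--         "has_underscores": any('_' in v for v in string_values),
--         "has_hyphens": any('-' in v for v in string_values),
--         "is_upper": any(v.isupper() for v in string_values),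
--         "is_lower": any(v.islower() for v in string_values),
--         "is_mixed_case": any(v != v.upper() and v != v.lower() for v in string_values)
--     }
--
--     # If there's high variation in formatting, it's inconsistent
--     pattern_count = sum(1 for v in patterns.values() if v)
--     return pattern_count <= 2  # Allow some variation
-- ===== SOURCE B (Python) =====
-- def _string_format_features(v):
--     """The set of formatting-feature labels a single string exhibits."""
--     f = set()
--     if ' ' in v:
--         f.add('spaces')
--     if '_' in v:
--         f.add('underscores')
--     if '-' in v:
--         f.add('hyphens')
--     if v.isupper():
--         f.add('upper')
--     if v.islower():
--         f.add('lower')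
--     if v != v.upper() and v != v.lower():
--         f.add('mixed')
--     return f
--
--
-- def _check_string_format_consistency(string_values):
--     """Union the per-string feature-label sets, bailing out as soon as
--     more than two distinct features have been observed."""
--     if len(string_values) < 2:
--         return True
--     seen = set()
--     for v in string_values:
--         seen |= _string_format_features(v)
--         if len(seen) > 2:
--             return False
--     return True
-- ===== Notes on version B (the rewrite author's own statement) =====
-- stated objective: alternative
-- what changed: Instead of six whole-list any() scans summed into a count, B maps each string to a set of feature labels and unions them in one pass with an early exit as soon as more than two distinct features have been seen.
import Mathlib
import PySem

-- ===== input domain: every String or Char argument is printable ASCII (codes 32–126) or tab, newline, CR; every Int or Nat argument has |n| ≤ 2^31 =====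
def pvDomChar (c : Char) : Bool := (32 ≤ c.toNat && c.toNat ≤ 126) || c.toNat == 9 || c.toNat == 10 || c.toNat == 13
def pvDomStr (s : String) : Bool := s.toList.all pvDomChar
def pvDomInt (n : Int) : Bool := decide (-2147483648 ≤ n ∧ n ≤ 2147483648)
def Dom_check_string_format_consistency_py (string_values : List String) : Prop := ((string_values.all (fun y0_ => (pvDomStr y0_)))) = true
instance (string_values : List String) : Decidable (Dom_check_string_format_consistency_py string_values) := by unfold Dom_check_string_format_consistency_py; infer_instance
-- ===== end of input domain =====

-- B replaces A's six whole-list any() scans summed into a count by a single pass that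
-- unions per-string feature-label sets with an early exit once more than two distinct
-- features are seen; same value everywhere (objective: alternative).

-- ===== PORT A =====
-- v.isupper(): at least one uppercase letter and no lowercase letter — exact on the ASCII domain
def pyStrIsupper (v : String) : Bool :=
  v.toList.any PySem.Chars.isupper && v.toList.all (fun c => !PySem.Chars.islower c)
-- v.islower(): at least one lowercase letter and no uppercase letter — exact on the ASCII domain
def pyStrIslower (v : String) : Bool :=
  v.toList.any PySem.Chars.islower && v.toList.all (fun c => !PySem.Chars.isupper c)
-- v != v.upper() and v != v.lower()
def pyMixedCase (v : String) : Bool :=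
  !(v == PySem.Str.upper v) && !(v == PySem.Str.lower v)

def check_string_format_consistency_py (string_values : List String) : Bool :=
  if string_values.length < 2 then true
  else
    let patterns : List Bool :=
      [ string_values.any (fun v => PySem.Str.isIn " " v),
        string_values.any (fun v => PySem.Str.isIn "_" v),
        string_values.any (fun v => PySem.Str.isIn "-" v),
        string_values.any pyStrIsupper,
        string_values.any pyStrIslower,
        string_values.any pyMixedCase ]
    let pattern_count : Int := patterns.foldl (fun acc b => if b then acc + 1 else acc) 0
    decide (pattern_count ≤ 2)

-- ===== PORT B =====
-- _string_format_features(v): the set of feature labels exhibited by one string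
def pyFormatFeatures (v : String) : PySem.Set String :=
  let f : PySem.Set String := PySem.Set.empty
  let f := if PySem.Str.isIn " " v then PySem.Set.add f "spaces" else f
  let f := if PySem.Str.isIn "_" v then PySem.Set.add f "underscores" else f
  let f := if PySem.Str.isIn "-" v then PySem.Set.add f "hyphens" else f
  let f := if pyStrIsupper v then PySem.Set.add f "upper" else f
  let f := if pyStrIslower v then PySem.Set.add f "lower" else f
  let f := if pyMixedCase v then PySem.Set.add f "mixed" else f
  f

-- the 'for v in string_values' loop with its early return
def pyFeatureLoop : List String → PySem.Set String → Bool
  | [], _ => true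
  | v :: rest, seen =>
      let seen' := PySem.Set.update seen (pyFormatFeatures v)
      if 2 < seen'.length then false else pyFeatureLoop rest seen'

def check_string_format_consistency_py_alt (string_values : List String) : Bool :=
  if string_values.length < 2 then true
  else pyFeatureLoop string_values PySem.Set.empty

-- ===== PRECONDITION & SPEC =====
def Spec_check_string_format_consistency_py (string_values : List String) (out : Bool) : Prop := out = check_string_format_consistency_py_alt string_values
instance (string_values : List String) (out : Bool) : Decidable (Spec_check_string_format_consistency_py string_values out) := by unfold Spec_check_string_format_consistency_py; infer_instance

-- ===== CLAIM (what is proved, stated in full; the proofs are below) =====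
def Claim_equal_check_string_format_consistency_py : Prop := ∀ (string_values : List String), Dom_check_string_format_consistency_py string_values → Spec_check_string_format_consistency_py string_values (check_string_format_consistency_py string_values)

-- ===== LEMMAS AND PROOFS =====

-- the six feature labels, and the per-label predicate
def pvLabels : List String := ["spaces", "underscores", "hyphens", "upper", "lower", "mixed"]

def pvPred (lab : String) (v : String) : Bool :=
  if lab = "spaces" then PySem.Str.isIn " " v
  else if lab = "underscores" then PySem.Str.isIn "_" v
  else if lab = "hyphens" then PySem.Str.isIn "-" v
  else if lab = "upper" then pyStrIsupper v
  else if lab = "lower" then pyStrIslower v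
  else if lab = "mixed" then pyMixedCase v
  else false

lemma features_eq_filter (v : String) :
    pyFormatFeatures v = pvLabels.filter (fun lab => pvPred lab v) := by
  unfold pyFormatFeatures pvLabels
  cases h1 : PySem.Str.isIn " " v <;> cases h2 : PySem.Str.isIn "_" v <;>
    cases h3 : PySem.Str.isIn "-" v <;> cases h4 : pyStrIsupper v <;>
    cases h5 : pyStrIslower v <;> cases h6 : pyMixedCase v <;>
    simp only [h1, h2, h3, h4, h5, h6, if_true, if_false, List.filter_cons, List.filter_nil,
      pvPred, Bool.false_eq_true] <;>
    simp [PySem.Set.add, PySem.Set.empty]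

-- the fold of set-updates collects exactly the labels some string exhibits
def pvFold (l : List String) (s : PySem.Set String) : PySem.Set String :=
  l.foldl (fun s v => PySem.Set.update s (pyFormatFeatures v)) s

lemma mem_pvFold (l : List String) (s : PySem.Set String) (x : String) :
    x ∈ pvFold l s ↔ x ∈ s ∨ ∃ v ∈ l, x ∈ pyFormatFeatures v := by
  induction l generalizing s with
  | nil => simp [pvFold]
  | cons v rest ih =>
    simp only [pvFold, List.foldl_cons] at *
    rw [ih]
    simp [PySem.Set.mem_update]
    tauto

lemma nodup_pvFold (l : List String) (s : PySem.Set String) (hs : s.Nodup) :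
    (pvFold l s).Nodup := by
  induction l generalizing s with
  | nil => simpa [pvFold]
  | cons v rest ih =>
    simp only [pvFold, List.foldl_cons]
    exact ih _ (PySem.Set.nodup_update s (pyFormatFeatures v) hs)

lemma len_le_pvFold (l : List String) (s : PySem.Set String) :
    s.length ≤ (pvFold l s).length := by
  induction l generalizing s with
  | nil => simp [pvFold]
  | cons v rest ih =>
    simp only [pvFold, List.foldl_cons]
    refine le_trans ?_ (ih _)
    rw [PySem.Set.update_eq_append_filter]
    simp

-- the loop with early exit computes the final-set test, as long as it has not tripped yet
lemma pyFeatureLoop_eq (l : List String) (s : PySem.Set String) (hs : s.length ≤ 2) :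
    pyFeatureLoop l s = decide ((pvFold l s).length ≤ 2) := by
  induction l generalizing s with
  | nil => simp [pyFeatureLoop, pvFold, hs]
  | cons v rest ih =>
    simp only [pyFeatureLoop, pvFold, List.foldl_cons]
    by_cases h : 2 < (PySem.Set.update s (pyFormatFeatures v)).length
    · simp only [h, if_true]
      have := len_le_pvFold rest (PySem.Set.update s (pyFormatFeatures v))
      have : ¬ (pvFold rest (PySem.Set.update s (pyFormatFeatures v))).length ≤ 2 := by omega
      simp [pvFold] at this ⊢
      omega
    · simp only [h, if_false]
      exact ih _ (by omega)

-- the final set is (as a set) the labels whose any-flag is set, hence has that many elements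
lemma len_pvFold_empty (sv : List String) :
    (pvFold sv PySem.Set.empty).length
      = (pvLabels.filter (fun lab => sv.any (pvPred lab))).length := by
  apply List.Perm.length_eq
  rw [List.perm_ext_iff_of_nodup (nodup_pvFold sv _ (by simp [PySem.Set.empty]))
      (List.Nodup.filter _ (by decide))]
  intro x
  rw [mem_pvFold]
  simp only [PySem.Set.empty, List.not_mem_nil, false_or, List.mem_filter, List.any_eq_true]
  constructor
  · rintro ⟨v, hv, hx⟩
    rw [features_eq_filter] at hx
    rcases List.mem_filter.mp hx with ⟨hlab, hp⟩
    exact ⟨hlab, v, hv, hp⟩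
  · rintro ⟨hlab, v, hv, hp⟩
    exact ⟨v, hv, by rw [features_eq_filter]; exact List.mem_filter.mpr ⟨hlab, hp⟩⟩

-- ===== VERDICT (by name: the statement is the Claim_ definition above) =====
theorem check_string_format_consistency_py_spec : Claim_equal_check_string_format_consistency_py := by
  intro sv _
  unfold Spec_check_string_format_consistency_py
  unfold check_string_format_consistency_py check_string_format_consistency_py_alt
  by_cases h : sv.length < 2
  · simp [h]
  · simp only [h, ite_false]
    rw [pyFeatureLoop_eq sv PySem.Set.empty (by simp [PySem.Set.empty]), len_pvFold_empty]
    have e1 : pvPred "spaces" = (fun v => PySem.Str.isIn " " v) := by funext v; simp [pvPred]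
    have e2 : pvPred "underscores" = (fun v => PySem.Str.isIn "_" v) := by funext v; simp [pvPred]
    have e3 : pvPred "hyphens" = (fun v => PySem.Str.isIn "-" v) := by funext v; simp [pvPred]
    have e4 : pvPred "upper" = pyStrIsupper := by funext v; simp [pvPred]
    have e5 : pvPred "lower" = pyStrIslower := by funext v; simp [pvPred]
    have e6 : pvPred "mixed" = pyMixedCase := by funext v; simp [pvPred]
    simp only [pvLabels, List.filter_cons, List.filter_nil, e1, e2, e3, e4, e5, e6]
    generalize sv.any (fun v => PySem.Str.isIn " " v) = b1
    generalize sv.any (fun v => PySem.Str.isIn "_" v) = b2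
    generalize sv.any (fun v => PySem.Str.isIn "-" v) = b3
    generalize sv.any pyStrIsupper = b4
    generalize sv.any pyStrIslower = b5
    generalize sv.any pyMixedCase = b6
    cases b1 <;> cases b2 <;> cases b3 <;> cases b4 <;> cases b5 <;> cases b6 <;> decide
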